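-- pv_equiv track=rewrite | github.com/AmoghMK/pes_university-projects_and_assignments | Kerberos-Authentication-Protocol/tgs_serv.py | padremove
-- ===== SOURCE A (Python) =====
-- def padremove(data):
--     flag=1
--     i=len(data)-1
--     while(flag==1 and i>=0):
--         if (data[i]=='0'):
--             i-=1
--         elif (data[i]=='1'):
--             flag=0
--         else:
--             flag=-1
--     if flag==0:
--         return(data[:i])
--     else:
--         return(data)
-- ===== SOURCE B (Python) =====
-- import re
--
-- def padremove(data):
--     # '1' followed only by '0's at the absolute end of the string; no match => unchanged
--     return re.sub(r'10*\Z', '', data)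
-- ===== Notes on version B (the rewrite author's own statement) =====
-- stated objective: idiomatic
-- what changed: Replaced the manual backward index/flag while-loop with a single end-anchored regex substitution (re.sub with pattern 10*\Z and an empty replacement), i.e. a leftmost forward match of a one followed only by trailing zeros.
import Mathlib
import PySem

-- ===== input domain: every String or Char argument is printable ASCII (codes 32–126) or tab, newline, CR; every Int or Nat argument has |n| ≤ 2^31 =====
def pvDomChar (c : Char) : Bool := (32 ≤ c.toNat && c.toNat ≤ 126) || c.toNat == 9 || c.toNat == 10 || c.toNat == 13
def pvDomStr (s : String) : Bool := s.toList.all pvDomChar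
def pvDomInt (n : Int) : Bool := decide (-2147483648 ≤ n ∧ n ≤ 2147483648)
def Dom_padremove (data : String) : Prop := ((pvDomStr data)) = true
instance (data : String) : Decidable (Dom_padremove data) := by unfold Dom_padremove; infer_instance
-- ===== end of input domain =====

-- B replaces A's backward index/flag while-loop with one anchored regex substitution
-- re.sub(r'10*\Z', '', data): delete the leftmost '1' followed only by '0's up to the end (idiomatic, same cost).

-- ===== PORT A =====
-- the while loop: state (flag, i); fuel bounds the iteration count (the loop runs at most len+1 times)
def padremoveGo (l : List Char) : Nat → Int → Int → Int × Int
  | 0, flag, i => (flag, i)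
  | fuel+1, flag, i =>
    if flag = 1 ∧ 0 ≤ i then
      match PySem.List.pyGet? l i with
      | some c =>
        if c = '0' then padremoveGo l fuel flag (i-1)
        else if c = '1' then padremoveGo l fuel 0 i
        else padremoveGo l fuel (-1) i
      | none => (flag, i)   -- unreachable: i starts at len-1 and only decreases down to the 0 ≤ i check
    else (flag, i)

def padremove (data : String) : String :=
  match padremoveGo data.toList (data.toList.length + 2) 1 ((data.toList.length : Int) - 1) with
  | (flag, i) => if flag = 0 then PySem.Str.slice data none (some i) else data

-- ===== PORT B =====
-- re.sub(r'10*\Z', '', data) has no PySem/Lean counterpart, so it is ported by hand and is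
-- exact for this pattern: re.sub scans for the LEFTMOST match start; '10*\Z' matches at a
-- position iff the character there is '1' and everything after it is '0'; the (unique) match
-- is replaced by '' (i.e. dropped); if no position matches, the string is returned unchanged.
def altGo : List Char → List Char
  | [] => []
  | c :: t => if c = '1' ∧ t.all (· == '0') then [] else c :: altGo t

def padremove_alt (data : String) : String := String.ofList (altGo data.toList)

-- ===== PRECONDITION & SPEC =====
def Spec_padremove (data : String) (out : String) : Prop := out = padremove_alt data
instance (data : String) (out : String) : Decidable (Spec_padremove data out) := by unfold Spec_padremove; infer_instance

-- ===== CLAIM (what is proved, stated in full; the proofs are below) =====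
def Claim_equal_padremove : Prop := ∀ (data : String), Dom_padremove data → Spec_padremove data (padremove data)

-- ===== LEMMAS AND PROOFS =====

-- common characterisation: both programs compute this function of the reversed-dropWhile split
def specFn (l : List Char) : List Char :=
  match l.reverse.dropWhile (· == '0') with
  | [] => l
  | c :: t => if c = '1' then t.reverse else l

-- A's loop, started at the end of l = s.reverse ++ tail, scans s from its head
theorem padremoveGo_spec (s : List Char) : ∀ (tail l : List Char) (fuel : Nat),
    l = s.reverse ++ tail → s.length + 1 < fuel →
    padremoveGo l fuel 1 ((s.length : Int) - 1) =
      (match s.dropWhile (· == '0') with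
       | [] => ((1 : Int), (-1 : Int))
       | c :: t => (if c = '1' then (0 : Int) else (-1 : Int), (t.length : Int))) := by
  induction s with
  | nil =>
    intro tail l fuel hl hf
    obtain ⟨f, rfl⟩ : ∃ f, fuel = f + 1 := ⟨fuel - 1, by omega⟩
    simp [padremoveGo]
  | cons c s ih =>
    intro tail l fuel hl hf
    obtain ⟨f, rfl⟩ : ∃ f, fuel = f + 1 := ⟨fuel - 1, by omega⟩
    have hi : ((c :: s).length : Int) - 1 = ((s.length : Nat) : Int) := by simp
    have hget : PySem.List.pyGet? l ((s.length : Nat) : Int) = some c := by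
      rw [PySem.List.pyGet?_natCast, hl]
      simp
    rw [hi]
    simp only [padremoveGo, hget]
    rw [if_pos (⟨trivial, Int.natCast_nonneg s.length⟩ : True ∧ (0:Int) ≤ (s.length : Int))]
    by_cases h0 : c = '0'
    · subst h0
      have := ih ('0' :: tail) l f (by simp [hl]) (by simpa using by omega)
      rw [show ((s.length : Nat) : Int) - 1 = ((s.length : Int) - 1) from rfl] at this ⊢
      rw [this]
      simp [List.dropWhile]
    · rw [if_neg h0]
      obtain ⟨g, rfl⟩ : ∃ g, f = g + 1 := ⟨f - 1, by simp at hf; omega⟩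
      have hb0 : (c == '0') = false := by simp [h0]
      by_cases h1 : c = '1'
      · rw [if_pos h1]
        simp [padremoveGo, List.dropWhile, h1]
      · rw [if_neg h1]
        simp [padremoveGo, List.dropWhile, hb0, h1]

-- B's forward scan computes the same function
theorem altGo_spec (l : List Char) : altGo l = specFn l := by
  induction l with
  | nil => simp [altGo, specFn]
  | cons c t ih =>
    unfold specFn
    simp only [List.reverse_cons, List.dropWhile_append]
    by_cases hz : t.all (· == '0')
    · have hdrop : t.reverse.dropWhile (· == '0') = [] := by
        rw [List.dropWhile_eq_nil_iff]
        intro x hx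
        exact (List.all_eq_true.mp hz x (List.mem_reverse.mp hx))
      have hspec : specFn t = t := by unfold specFn; rw [hdrop]
      rw [hdrop]
      simp only [List.isEmpty_nil, if_true]
      by_cases h1 : c = '1'
      · subst h1
        have e : altGo ('1' :: t) = [] := by simp [altGo, hz]
        rw [e, List.dropWhile_cons]
        simp
      · have e : altGo (c :: t) = c :: altGo t := by simp [altGo, h1]
        rw [e, ih, hspec, List.dropWhile_cons]
        by_cases h0 : c = '0'
        · subst h0
          simp
        · simp [h0, h1]
    · obtain ⟨d, u, hdu⟩ : ∃ d u, t.reverse.dropWhile (· == '0') = d :: u := by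
        cases h : t.reverse.dropWhile (· == '0') with
        | nil =>
          exact absurd (List.all_eq_true.mpr (fun x hx =>
            List.dropWhile_eq_nil_iff.mp h x (List.mem_reverse.mpr hx))) hz
        | cons d u => exact ⟨d, u, rfl⟩
      have hspec : specFn t = if d = '1' then u.reverse else t := by unfold specFn; rw [hdu]
      rw [hdu]
      simp only [List.isEmpty_cons, altGo, hz, ih, hspec]
      by_cases h1 : d = '1'
      · simp [h1]
      · simp [h1]

theorem padremove_eq (data : String) : padremove data = padremove_alt data := by
  unfold padremove padremove_alt
  rw [altGo_spec]
  have hkey := padremoveGo_spec data.toList.reverse [] data.toList (data.toList.length + 2)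
      (by simp) (by simp)
  rw [List.length_reverse] at hkey
  rw [hkey]
  unfold specFn
  have hsplit := List.takeWhile_append_dropWhile (p := (· == '0')) (l := data.toList.reverse)
  cases hd : data.toList.reverse.dropWhile (· == '0') with
  | nil =>
    dsimp only
    rw [if_neg (by norm_num : ¬ ((1:Int) = 0))]
    simp
  | cons c t =>
    have hl : data.toList = t.reverse ++ c :: (data.toList.reverse.takeWhile (· == '0')).reverse := by
      conv_lhs => rw [← List.reverse_reverse data.toList, ← hsplit, hd]
      simp
    dsimp only
    by_cases h1 : c = '1'
    · subst h1
      simp only [reduceIte]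
      apply String.toList_inj.mp
      rw [PySem.Str.toList_slice]
      simp only [PySem.Chars.slice_eq_listSlice]
      rw [PySem.List.slice_to_natCast]
      conv_lhs => rw [hl]
      rw [List.take_left' (by simp)]
      simp
    · rw [if_neg h1, if_neg (by norm_num : ¬ (-1:Int) = 0), if_neg h1]
      simp

-- ===== VERDICT (by name: the statement is the Claim_ definition above) =====
theorem padremove_spec : Claim_equal_padremove := by
  intro data _
  exact padremove_eq data
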